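-- pv_equiv track=rewrite | github.com/twodogs-wang/inf552 | decison_tree_id3.py | __major_cases
-- ===== SOURCE A (Python) =====
-- def __major_cases(_data_set):
--     """
--     this function calculates the majority classify of the last column of dataset,
--     this function will be called when corner cases occured:
--     1. no attributes anymore but last column still contain values
--     2. all the rest attributes have the same decisions combinations but the last column labelsa are different
--     :param _data_set:
--     :return: the majority label
--     """
--     _index={}
--     _freq=[]
--     for row in _data_set:
--         if row[-1] in _index:
--             _freq[_index[row[-1]]][1]+=1
--         else:
--             _index.update({row[-1]: len(_freq)})
--             _freq.append([row[-1],1])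
--     _freq=sorted(_freq,key= lambda x:x[1],reverse=True)
--
--     return _freq[0][0]
-- ===== SOURCE B (Python) =====
-- def __major_cases(_data_set):
--     """Majority label of the last column: count into an insertion-ordered dict,
--     then take the first strictly-greatest count in one pass (no sort)."""
--     counts = {}
--     for row in _data_set:
--         lab = row[-1]
--         counts[lab] = counts.get(lab, 0) + 1
--     items = list(counts.items())
--     best = items[0]
--     for p in items:
--         if p[1] > best[1]:
--             best = p
--     return best[0]
-- ===== Notes on version B (the rewrite author's own statement) =====
-- stated objective: simpler
-- what changed: Counts labels into one plain dict and picks the majority with a single strict-> scan in insertion order, instead of maintaining a parallel index dict plus a mutable frequency list and sorting it.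
import Mathlib
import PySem

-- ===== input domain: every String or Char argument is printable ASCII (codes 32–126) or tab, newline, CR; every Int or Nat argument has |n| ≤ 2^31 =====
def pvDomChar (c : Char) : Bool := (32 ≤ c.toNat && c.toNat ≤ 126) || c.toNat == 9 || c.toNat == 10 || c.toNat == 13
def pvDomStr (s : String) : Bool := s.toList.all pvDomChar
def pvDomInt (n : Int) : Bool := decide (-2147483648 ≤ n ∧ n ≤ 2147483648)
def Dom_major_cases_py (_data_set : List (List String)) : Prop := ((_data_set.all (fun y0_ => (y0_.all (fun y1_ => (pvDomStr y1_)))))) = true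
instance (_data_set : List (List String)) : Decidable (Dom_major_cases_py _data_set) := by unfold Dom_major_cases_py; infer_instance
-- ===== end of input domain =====

-- B counts labels into one insertion-ordered dict and takes the first strictly-greatest count in
-- a single scan, instead of A's parallel index-dict + mutable frequency list + stable reverse sort.

-- ===== PORT A =====
-- one iteration of A's counting loop: state = (_index, _freq)
def majorStep (st : PySem.Dict String Int × List (String × Int)) (row : List String) :
    PySem.Dict String Int × List (String × Int) :=
  match PySem.List.pyGet? row (-1) with
  | none => st      -- row[-1] raises IndexError; such inputs are excluded by Pre_
  | some lab =>
    if st.1.contains lab then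
      -- _freq[_index[lab]][1] += 1 ; the lookup is guarded by 'in', and the stored index is a
      -- previous length of _freq, hence ≥ 0 and in range, so getD/toNat/modify are exact here
      (st.1, st.2.modify (st.1.getD lab 0).toNat (fun p => (p.1, p.2 + 1)))
    else
      (st.1.insert lab (st.2.length : Int), st.2 ++ [(lab, 1)])

def major_cases_py (_data_set : List (List String)) : String :=
  let st := _data_set.foldl majorStep (PySem.Dict.empty, [])
  let freq := PySem.List.sorted st.2 (fun p => p.2) true
  -- _freq[0][0] ; raises IndexError on the empty dataset, excluded by Pre_
  ((PySem.List.pyGet? freq 0).getD ("", 0)).1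

-- ===== PORT B =====
-- one iteration of B's counting loop
def bCount (d : PySem.Dict String Int) (row : List String) : PySem.Dict String Int :=
  match PySem.List.pyGet? row (-1) with
  | none => d     -- row[-1] raises IndexError; excluded by Pre_
  | some lab => d.insert lab (d.getD lab 0 + 1)

def major_cases_py_alt (_data_set : List (List String)) : String :=
  let counts := _data_set.foldl bCount PySem.Dict.empty
  let items := counts.items
  match PySem.List.pyGet? items 0 with
  | none => ""     -- items[0] raises IndexError on the empty dataset, excluded by Pre_
  | some b0 => (items.foldl (fun best p => if p.2 > best.2 then p else best) b0).1

-- ===== PRECONDITION & SPEC =====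
-- A raises IndexError on the empty dataset (_freq[0][0]) and whenever some row is empty (row[-1]);
-- Pre_ excludes exactly those inputs (B raises there too).
def Pre_major_cases_py (_data_set : List (List String)) : Prop :=
  _data_set ≠ [] ∧ ∀ row ∈ _data_set, row ≠ []
instance (_data_set : List (List String)) : Decidable (Pre_major_cases_py _data_set) := by
  unfold Pre_major_cases_py; infer_instance

def pvWitness_major_cases_py : List (List String) := [["a", "yes"], ["b", "no"], ["c", "yes"]]

def Spec_major_cases_py (_data_set : List (List String)) (out : String) : Prop := out = major_cases_py_alt _data_set
instance (_data_set : List (List String)) (out : String) : Decidable (Spec_major_cases_py _data_set out) := by unfold Spec_major_cases_py; infer_instance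

-- ===== CLAIM (what is proved, stated in full; the proofs are below) =====
def Claim_equal_major_cases_py : Prop := ∀ (_data_set : List (List String)), Dom_major_cases_py _data_set → Pre_major_cases_py _data_set → Spec_major_cases_py _data_set (major_cases_py _data_set)

-- ===== LEMMAS AND PROOFS =====

-- A's counting step with the label already extracted
def aStep (st : PySem.Dict String Int × List (String × Int)) (lab : String) :
    PySem.Dict String Int × List (String × Int) :=
  if st.1.contains lab then
    (st.1, st.2.modify (st.1.getD lab 0).toNat (fun p => (p.1, p.2 + 1)))
  else
    (st.1.insert lab (st.2.length : Int), st.2 ++ [(lab, 1)])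

-- what A's frequency list is after counting the labels `seen`
def canonFreq (seen : List String) : List (String × Int) :=
  (PySem.Set.ofList seen).map (fun k => (k, (seen.count k : Int)))

def AInv (seen : List String) (st : PySem.Dict String Int × List (String × Int)) : Prop :=
  st.2 = canonFreq seen ∧
  ∀ lab, st.1.get? lab = (PySem.List.index? (PySem.Set.ofList seen) lab).map (fun n => (n : Int))

theorem foldA_eq (ds : List (List String)) (st : PySem.Dict String Int × List (String × Int)) :
    ds.foldl majorStep st = (ds.filterMap (fun r => PySem.List.pyGet? r (-1))).foldl aStep st := by
  induction ds generalizing st with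
  | nil => rfl
  | cons r rs ih =>
    cases h : PySem.List.pyGet? r (-1) with
    | none => simp [majorStep, h, ih]
    | some lab => simp [majorStep, aStep, h, ih]

theorem foldB_eq (ds : List (List String)) (d : PySem.Dict String Int) :
    ds.foldl bCount d =
    (ds.filterMap (fun r => PySem.List.pyGet? r (-1))).foldl
      (fun d lab => d.insert lab (d.getD lab 0 + 1)) d := by
  induction ds generalizing d with
  | nil => rfl
  | cons r rs ih =>
    cases h : PySem.List.pyGet? r (-1) with
    | none => simp [bCount, h, ih]
    | some lab => simp [bCount, h, ih]

theorem modify_append_cons {α : Type} (pre suf : List α) (a : α) (f : α → α) :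
    (pre ++ a :: suf).modify pre.length f = pre ++ f a :: suf := by
  simp [List.modify_eq_set_getElem?]

theorem aInv_foldA (seen : List String) :
    AInv seen (seen.foldl aStep (PySem.Dict.empty, [])) := by
  induction seen using List.reverseRecOn with
  | nil =>
    constructor
    · rfl
    · intro lab; rfl
  | append_singleton seen x ih =>
    rw [List.foldl_append]
    obtain ⟨hf, hd⟩ := ih
    set st := seen.foldl aStep (PySem.Dict.empty, []) with hst
    simp only [List.foldl_cons, List.foldl_nil]
    have hS' : PySem.Set.ofList (seen ++ [x]) = (PySem.Set.ofList seen).add x := by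
      rw [PySem.Set.ofList_append]; rfl
    have hnd := PySem.Set.nodup_ofList (α := String) seen
    by_cases hx : x ∈ seen
    · -- x already counted: _freq is modified in place, _index unchanged
      have hxS : x ∈ PySem.Set.ofList seen := (PySem.Set.mem_ofList seen x).mpr hx
      have hadd : (PySem.Set.ofList seen).add x = PySem.Set.ofList seen := by
        simp [PySem.Set.add, hxS]
      obtain ⟨i, hi⟩ := Option.isSome_iff_exists.mp
        ((PySem.List.index?_isSome_iff (PySem.Set.ofList seen) x).mpr hxS)
      have hcont : st.1.contains x = true := by
        rw [PySem.Dict.contains_eq_isSome_get?, hd x, hi]; rfl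
      have hgetD : st.1.getD x 0 = (i : Int) := by
        rw [PySem.Dict.getD_eq_get?_getD, hd x, hi]; rfl
      obtain ⟨pre, suf, hsplit, hlen, hxpre⟩ :=
        (PySem.List.index?_eq_some_iff (PySem.Set.ofList seen) x i).mp hi
      have hxsuf : x ∉ suf := by
        rw [hsplit] at hnd
        exact (List.nodup_cons.mp hnd.of_append_right).1
      simp only [aStep, hcont, if_true]
      constructor
      · show st.2.modify (st.1.getD x 0).toNat (fun p => (p.1, p.2 + 1)) = canonFreq (seen ++ [x])
        rw [hgetD, hf]
        have h1 : ((i : Int)).toNat = i := rfl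
        rw [h1]
        unfold canonFreq
        rw [hS', hadd, hsplit, ← hlen]
        rw [List.map_append, List.map_cons, List.map_append, List.map_cons]
        have hlen' : (pre.map (fun k => (k, (seen.count k : Int)))).length = pre.length := by simp
        rw [← hlen', modify_append_cons]
        have hpre : pre.map (fun k => (k, (seen.count k : Int))) =
            pre.map (fun k => (k, ((seen ++ [x]).count k : Int))) := by
          apply List.map_congr_left
          intro k hk
          have hne : k ≠ x := fun h => hxpre (h ▸ hk)
          simp [List.count_append, List.count_eq_zero, hne]
        have hsuf : suf.map (fun k => (k, (seen.count k : Int))) =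
            suf.map (fun k => (k, ((seen ++ [x]).count k : Int))) := by
          apply List.map_congr_left
          intro k hk
          have hne : k ≠ x := fun h => hxsuf (h ▸ hk)
          simp [List.count_append, List.count_eq_zero, hne]
        rw [← hpre, ← hsuf]
        congr 2
        simp [List.count_append]
      · intro lab
        rw [hd lab, hS', hadd]
    · -- x is new: it is appended to _freq and recorded in _index at position len(_freq)
      have hxS : x ∉ PySem.Set.ofList seen := fun h => hx ((PySem.Set.mem_ofList seen x).mp h)
      have hadd : (PySem.Set.ofList seen).add x = PySem.Set.ofList seen ++ [x] := by
        simp [PySem.Set.add, hxS]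
      have hcont : st.1.contains x = false := by
        rw [PySem.Dict.contains_eq_isSome_get?, hd x,
          (PySem.List.index?_eq_none_iff _ _).mpr hxS]; rfl
      have hflen : st.2.length = (PySem.Set.ofList seen).length := by
        rw [hf]; unfold canonFreq; simp
      simp only [aStep, hcont, Bool.false_eq_true, if_false]
      constructor
      · show st.2 ++ [(x, 1)] = canonFreq (seen ++ [x])
        unfold canonFreq
        rw [hS', hadd, List.map_append, hf]
        unfold canonFreq
        congr 1
        · apply List.map_congr_left
          intro k hk
          have hne : k ≠ x := fun h => hxS (h ▸ hk)
          simp [List.count_append, List.count_eq_zero, hne]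
        · simp [List.count_append, List.count_eq_zero.mpr hx]
      · intro lab
        show (st.1.insert x (st.2.length : Int)).get? lab = _
        rw [hS', hadd]
        by_cases hlx : lab = x
        · rw [hlx, PySem.Dict.get?_insert_self,
            PySem.List.index?_append_singleton_self _ x hxS, hflen]
          rfl
        · rw [PySem.Dict.get?_insert_of_ne _ _ hlx, hd lab]
          by_cases hls : lab ∈ PySem.Set.ofList seen
          · rw [PySem.List.index?_append_of_mem _ hls]
          · rw [(PySem.List.index?_eq_none_iff _ _).mpr hls,
              (PySem.List.index?_eq_none_iff _ _).mpr (by simp [hls, hlx])]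

-- the step B's second loop takes
def bestStep (q p : String × Int) : String × Int := if q.2 < p.2 then p else q

theorem insertBy_head (x : String × Int) (l : List (String × Int)) :
    (PySem.List.insertBy (fun a b => decide (b.2 < a.2)) x l).head? =
      some (match l.head? with
            | none => x
            | some y => if y.2 < x.2 then x else y) := by
  cases l with
  | nil => rfl
  | cons y ys =>
    by_cases h : y.2 < x.2 <;> simp [PySem.List.insertBy, h]

theorem foldOpt_some (l : List (String × Int)) (q : String × Int) :
    l.foldl (fun b p => match b with
      | none => some p
      | some q => if q.2 < p.2 then some p else some q) (some q) =
    some (l.foldl bestStep q) := by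
  induction l generalizing q with
  | nil => rfl
  | cons p t ih =>
    simp only [List.foldl_cons]
    by_cases h : q.2 < p.2 <;> simp [bestStep, h, ih]

theorem head_foldl_insertBy (l : List (String × Int)) (acc : List (String × Int)) :
    (l.foldl (fun acc x => PySem.List.insertBy (fun a b => decide (b.2 < a.2)) x acc) acc).head? =
    l.foldl (fun b p => match b with
      | none => some p
      | some q => if q.2 < p.2 then some p else some q) acc.head? := by
  induction l generalizing acc with
  | nil => rfl
  | cons x t ih =>
    simp only [List.foldl_cons]
    rw [ih, insertBy_head]
    cases acc with
    | nil => rfl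
    | cons y ys => by_cases h : y.2 < x.2 <;> simp [h]

-- head of A's stable reverse sort = B's first strictly-greatest scan
theorem head_sorted_rev (b0 : String × Int) (rest : List (String × Int)) :
    (PySem.List.sorted (b0 :: rest) (fun p => p.2) true).head? =
      some (rest.foldl bestStep b0) := by
  rw [PySem.List.sorted_rev_eq_foldl_insertBy, head_foldl_insertBy]
  simp only [List.foldl_cons]
  exact foldOpt_some rest b0

-- ===== VERDICT (by name: the statement is the Claim_ definition above) =====
theorem major_cases_py_spec : Claim_equal_major_cases_py := by
  intro ds _ hpre
  obtain ⟨hne, hrows⟩ := hpre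
  unfold Spec_major_cases_py major_cases_py major_cases_py_alt
  simp only
  rw [foldA_eq, foldB_eq]
  set labs := ds.filterMap (fun r => PySem.List.pyGet? r (-1)) with hlabs
  -- labs is nonempty
  have hlne : labs ≠ [] := by
    match ds, hne with
    | r :: rs, _ =>
      have hr : r ≠ [] := hrows r (by simp)
      obtain ⟨lab, hlab⟩ : ∃ lab, PySem.List.pyGet? r (-1) = some lab := by
        rw [PySem.List.pyGet?_neg_one]
        exact ⟨r.getLast hr, List.getLast?_eq_some_getLast hr⟩
      simp [hlabs, hlab]
  obtain ⟨hf, -⟩ := aInv_foldA labs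
  rw [hf]
  rw [PySem.Dict.foldl_insert_getD_add_one_eq_counter, PySem.Dict.items_counter]
  have hcanon : canonFreq labs =
      (PySem.Set.ofList labs).map (fun k => (k, (labs.count k : Int))) := rfl
  rw [← hcanon]
  -- canonFreq labs is nonempty
  have hcne : canonFreq labs ≠ [] := by
    unfold canonFreq
    intro h
    have hS0 : PySem.Set.ofList labs = [] := List.map_eq_nil_iff.mp h
    cases hl : labs with
    | nil => exact hlne hl
    | cons a t =>
      have ha : a ∈ PySem.Set.ofList labs := (PySem.Set.mem_ofList labs a).mpr (by simp [hl])
      rw [hS0] at ha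
      simp at ha
  match hc : canonFreq labs, hcne with
  | b0 :: rest, _ =>
    have hsne : PySem.List.sorted (b0 :: rest) (fun p => p.2) true ≠ [] := by
      rw [Ne, PySem.List.sorted_eq_nil_iff]; simp
    match hs : PySem.List.sorted (b0 :: rest) (fun p => p.2) true, hsne with
    | m :: t, _ =>
      have hhead : some m = some (rest.foldl bestStep b0) := by
        rw [← head_sorted_rev b0 rest, hs]; rfl
      have hm : m = rest.foldl bestStep b0 := Option.some_injective _ hhead
      simp only [PySem.List.pyGet?_zero_cons, Option.getD_some, hm]
      -- B folds over all items starting from items[0]; the first step is a no-op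
      have hB : (b0 :: rest).foldl (fun best p => if p.2 > best.2 then p else best) b0 =
          rest.foldl bestStep b0 := by
        simp only [List.foldl_cons, gt_iff_lt, lt_irrefl, if_false]
        exact PySem.List.foldl_congr_mem rest _ _ b0
          (fun acc x _ => by simp [bestStep])
      rw [hB]
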